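-- pv_equiv track=rewrite | github.com/achoruzy/ProjectEuler | 0061_Cyclical_figurate_numbers.py | square_gen
-- ===== SOURCE A (Python) =====
-- def square_gen(start: int, stop: int) -> int:
--     num = 1
--     result = 0
--     while result <= stop:
--         result = num * num
--         if stop >= result >= start:
--             yield result
--         num += 1
-- ===== SOURCE B (Python) =====
-- def square_gen(start: int, stop: int):
--     if stop < 1:
--         return
--     hi = _isqrt(stop)
--     lo = _isqrt(max(start, 1) - 1) + 1
--     for n in range(lo, hi + 1):
--         yield n * n
--
--
-- def _isqrt(n: int) -> int:
--     # Newton's method for the integer square root (n >= 0).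
--     if n == 0:
--         return 0
--     x = n
--     y = (x + n // x) // 2
--     while y < x:
--         x = y
--         y = (x + n // x) // 2
--     return x
-- ===== Notes on version B (the rewrite author's own statement) =====
-- stated objective: alternative
-- what changed: B replaces A's scan-from-1-with-membership-guard loop by computing integer-sqrt bounds first (Newton's method) and yielding n*n directly over range(lo, hi+1) with no per-element test.
import Mathlib
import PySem

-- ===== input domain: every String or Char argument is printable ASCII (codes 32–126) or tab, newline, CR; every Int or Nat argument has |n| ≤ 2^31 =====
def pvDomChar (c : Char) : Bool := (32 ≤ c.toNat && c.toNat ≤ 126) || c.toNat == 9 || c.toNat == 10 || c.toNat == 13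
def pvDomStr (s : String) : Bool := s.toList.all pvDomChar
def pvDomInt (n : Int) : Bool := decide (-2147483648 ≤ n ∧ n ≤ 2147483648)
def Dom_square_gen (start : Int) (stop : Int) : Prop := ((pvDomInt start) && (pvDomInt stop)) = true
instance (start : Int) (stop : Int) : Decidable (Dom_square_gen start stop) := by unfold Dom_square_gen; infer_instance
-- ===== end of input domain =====

-- B computes integer-sqrt bounds first and yields n*n over a direct range, instead of
-- A's scan-from-1 with a membership guard (objective: alternative decomposition).

-- ===== PORT A =====
-- A's while-loop; the fuel argument only makes the same computation total
-- (proved sufficient below: the loop stops once the previous square exceeds stop).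
def squareGenLoop (start stop : Int) : Nat → Int → Int → List Int → List Int
  | 0, _, _, acc => acc
  | fuel+1, num, result, acc =>
    if result ≤ stop then
      squareGenLoop start stop fuel (num + 1) (num * num)
        (if stop ≥ num * num ∧ num * num ≥ start then acc ++ [num * num] else acc)
    else acc

def square_gen (start : Int) (stop : Int) : List Int :=
  squareGenLoop start stop (stop.toNat + 2) 1 0 []

-- ===== PORT B =====
-- Source B's Newton loop `while y < x: x = y; y = (x + n//x)//2`; fuel is a totality guard only.
def isqrtLoop (n : Int) : Nat → Int → Int → Int
  | 0, x, _ => x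
  | fuel+1, x, y =>
    if y < x then
      isqrtLoop n fuel y (PySem.Int.floordiv (y + PySem.Int.floordiv n y) 2)
    else x

def isqrt (n : Int) : Int :=
  if n = 0 then 0
  else
    isqrtLoop n (n.toNat + 1) n (PySem.Int.floordiv (n + PySem.Int.floordiv n n) 2)

def square_gen_alt (start : Int) (stop : Int) : List Int :=
  if stop < 1 then []
  else
    let hi := isqrt stop
    let lo := isqrt (max start 1 - 1) + 1
    (PySem.List.pyRange lo (hi + 1) 1).map (fun n => n * n)

-- ===== PRECONDITION & SPEC =====
def Spec_square_gen (start : Int) (stop : Int) (out : List Int) : Prop := out = square_gen_alt start stop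
instance (start : Int) (stop : Int) (out : List Int) : Decidable (Spec_square_gen start stop out) := by unfold Spec_square_gen; infer_instance

-- ===== CLAIM (what is proved, stated in full; the proofs are below) =====
def Claim_equal_square_gen : Prop := ∀ (start : Int) (stop : Int), Dom_square_gen start stop → Spec_square_gen start stop (square_gen start stop)

-- ===== LEMMAS AND PROOFS =====

-- integer square root brackets, cast to Int
theorem sqrtInt_le (c : Int) (hc : 0 ≤ c) :
    (Nat.sqrt c.toNat : Int) * (Nat.sqrt c.toNat : Int) ≤ c := by
  have h : ((Nat.sqrt c.toNat : Int)) * (Nat.sqrt c.toNat : Int) ≤ (c.toNat : Int) := by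
    exact_mod_cast Nat.sqrt_le c.toNat
  rwa [Int.toNat_of_nonneg hc] at h

theorem lt_succ_sqrtInt (c : Int) (hc : 0 ≤ c) :
    c < ((Nat.sqrt c.toNat : Int) + 1) * ((Nat.sqrt c.toNat : Int) + 1) := by
  have h : (c.toNat : Int) < ((Nat.sqrt c.toNat : Int) + 1) * ((Nat.sqrt c.toNat : Int) + 1) := by
    exact_mod_cast Nat.lt_succ_sqrt c.toNat
  rwa [Int.toNat_of_nonneg hc] at h

theorem sqrtInt_lt_iff (c a : Int) (hc : 0 ≤ c) (ha : 1 ≤ a) :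
    (Nat.sqrt c.toNat : Int) < a ↔ c < a * a := by
  constructor
  · intro h
    have h2 := lt_succ_sqrtInt c hc
    nlinarith
  · intro h
    by_contra hle
    rw [not_lt] at hle
    have h2 := sqrtInt_le c hc
    nlinarith

-- Newton step stays ≥ √n
theorem newton_ge_sqrt (n x : Int) (hn : 0 ≤ n) (hx : 1 ≤ x) :
    (Nat.sqrt n.toNat : Int) ≤ PySem.Int.floordiv (x + PySem.Int.floordiv n x) 2 := by
  rw [PySem.Int.floordiv_eq_ediv_of_pos (show (0:Int) < x by omega),
      PySem.Int.floordiv_eq_ediv_of_pos (show (0:Int) < 2 by norm_num)]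
  set s := (Nat.sqrt n.toNat : Int) with hs
  have hs2 : s * s ≤ n := sqrtInt_le n hn
  have hq : x * (n / x) + n % x = n := Int.mul_ediv_add_emod n x
  have hr0 : 0 ≤ n % x := Int.emod_nonneg n (by omega)
  have hr1 : n % x < x := Int.emod_lt_of_pos n (by omega)
  have hq0 : 0 ≤ n / x := Int.ediv_nonneg hn (by omega)
  have hs0 : 0 ≤ s := by positivity
  rw [Int.le_ediv_iff_mul_le (by norm_num : (0:Int) < 2)]
  by_contra hcon
  rw [not_le] at hcon
  have hT : 1 ≤ x + n / x + 1 := by omega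
  have hTle : x + n / x + 1 ≤ 2 * s := by omega
  have hsq : (x + n / x + 1) * (x + n / x + 1) ≤ (2 * s) * (2 * s) :=
    mul_le_mul hTle hTle (by omega) (by omega)
  nlinarith [sq_nonneg (x - n / x - 1)]

-- Newton step decreases while above √n
theorem newton_lt_self (n x : Int) (hn : 0 ≤ n)
    (hx : (Nat.sqrt n.toNat : Int) < x) :
    PySem.Int.floordiv (x + PySem.Int.floordiv n x) 2 < x := by
  have hx1 : 1 ≤ x := by
    have : (0:Int) ≤ (Nat.sqrt n.toNat : Int) := by positivity
    omega
  rw [PySem.Int.floordiv_eq_ediv_of_pos (show (0:Int) < x by omega),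
      PySem.Int.floordiv_eq_ediv_of_pos (show (0:Int) < 2 by norm_num)]
  have hlt : n < x * x := by
    have h2 := lt_succ_sqrtInt n hn
    nlinarith
  have hq : n / x < x := by
    rw [Int.ediv_lt_iff_lt_mul (by omega : (0:Int) < x)]
    nlinarith
  rw [Int.ediv_lt_iff_lt_mul (by norm_num : (0:Int) < 2)]
  omega

theorem isqrtLoop_eq (n : Int) (hn : 1 ≤ n) :
    ∀ (fuel : Nat) (x : Int), (Nat.sqrt n.toNat : Int) ≤ x → x ≤ (fuel : Int) →
      isqrtLoop n fuel x (PySem.Int.floordiv (x + PySem.Int.floordiv n x) 2)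
        = (Nat.sqrt n.toNat : Int) := by
  intro fuel
  induction fuel with
  | zero =>
    intro x hxs hxf
    have hs1 : 1 ≤ (Nat.sqrt n.toNat : Int) := by
      have : 0 < Nat.sqrt n.toNat := Nat.sqrt_pos.mpr (by omega)
      omega
    omega
  | succ fuel ih =>
    intro x hxs hxf
    have hx1 : 1 ≤ x := by
      have hs1 : 1 ≤ (Nat.sqrt n.toNat : Int) := by
        have : 0 < Nat.sqrt n.toNat := Nat.sqrt_pos.mpr (by omega)
        omega
      omega
    set y := PySem.Int.floordiv (x + PySem.Int.floordiv n x) 2 with hy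
    have hys : (Nat.sqrt n.toNat : Int) ≤ y := newton_ge_sqrt n x (by omega) hx1
    by_cases hlt : y < x
    · rw [isqrtLoop, if_pos hlt]
      exact ih y hys (by omega)
    · rw [isqrtLoop, if_neg hlt]
      rw [not_lt] at hlt
      by_cases heq : (Nat.sqrt n.toNat : Int) < x
      · have := newton_lt_self n x (by omega) heq
        omega
      · omega

theorem isqrt_eq (n : Int) (hn : 0 ≤ n) : isqrt n = (Nat.sqrt n.toNat : Int) := by
  by_cases h0 : n = 0
  · subst h0; simp [isqrt]
  · have hn1 : 1 ≤ n := by omega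
    rw [isqrt, if_neg h0]
    apply isqrtLoop_eq n hn1 (n.toNat + 1) n
    · have := Nat.sqrt_le_self n.toNat
      omega
    · omega

-- the list A appends, from index num up to hi = √stop
def seg (start hi num : Int) : List Int :=
  ((PySem.List.pyRange num (hi + 1) 1).filter (fun n => decide (start ≤ n * n))).map
    (fun n => n * n)

-- once result > stop the loop returns acc for every fuel
theorem squareGenLoop_done (start stop : Int) (fuel : Nat) (num result : Int)
    (acc : List Int) (h : stop < result) :
    squareGenLoop start stop fuel num result acc = acc := by
  cases fuel with
  | zero => rfl
  | succ fuel => rw [squareGenLoop, if_neg (by omega)]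

-- seg unfolds one step at the head of the range
theorem seg_cons (start hi num : Int) (h : num ≤ hi) :
    seg start hi num
      = (if start ≤ num * num then [num * num] else []) ++ seg start hi (num + 1) := by
  rw [seg, PySem.List.pyRange_one_cons (by omega : num < hi + 1), List.filter_cons]
  by_cases hst : start ≤ num * num
  · simp [seg, hst]
  · simp [seg, hst]

theorem seg_nil (start hi num : Int) (h : hi < num) : seg start hi num = [] := by
  rw [seg, PySem.List.pyRange_one_eq_nil (by omega : hi + 1 ≤ num)]
  simp

theorem squareGenLoop_eq (start stop : Int) (hstop : 1 ≤ stop) :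
    ∀ (fuel : Nat) (num result : Int) (acc : List Int),
      1 ≤ num → num ≤ (Nat.sqrt stop.toNat : Int) + 1 → result ≤ stop →
      (Nat.sqrt stop.toNat : Int) + 2 - num ≤ (fuel : Int) →
      squareGenLoop start stop fuel num result acc
        = acc ++ seg start (Nat.sqrt stop.toNat : Int) num := by
  intro fuel
  induction fuel with
  | zero => intro num result acc h1 h2 h3 h4; simp at h4; omega
  | succ fuel ih =>
    intro num result acc h1 h2 h3 h4
    rw [squareGenLoop, if_pos h3]
    by_cases hle : num ≤ (Nat.sqrt stop.toNat : Int)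
    · have hr : num * num ≤ stop := by
        have := sqrtInt_le stop (by omega)
        nlinarith
      rw [ih (num + 1) (num * num)
            (if stop ≥ num * num ∧ num * num ≥ start then acc ++ [num * num] else acc)
            (by omega) (by omega) hr (by push_cast at h4 ⊢; omega)]
      rw [seg_cons start _ num hle]
      by_cases hst : start ≤ num * num
      · rw [if_pos (by omega), if_pos hst]
        simp
      · rw [if_neg (by omega), if_neg hst]
        simp
    · have hnum : num = (Nat.sqrt stop.toNat : Int) + 1 := by omega
      have hr : stop < num * num := by
        have := lt_succ_sqrtInt stop (by omega)
        nlinarith [hnum]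
      rw [if_neg (by omega)]
      rw [squareGenLoop_done start stop fuel (num + 1) (num * num) acc hr]
      rw [seg_nil start _ num (by omega)]
      simp

-- filtering n ≥ 1 by `start ≤ n*n` keeps exactly the n ≥ lo, lo = √(max start 1 − 1) + 1
theorem filter_threshold (start : Int) :
    ∀ (k : Nat) (a b : Int), b - a ≤ (k : Int) → 1 ≤ a →
      (PySem.List.pyRange a b 1).filter (fun n => decide (start ≤ n * n))
        = PySem.List.pyRange (max a ((Nat.sqrt (max start 1 - 1).toNat : Int) + 1)) b 1 := by
  intro k
  set lo := (Nat.sqrt (max start 1 - 1).toNat : Int) + 1 with hlo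
  induction k with
  | zero =>
    intro a b hk ha
    rw [PySem.List.pyRange_one_eq_nil (by omega : b ≤ a),
        PySem.List.pyRange_one_eq_nil (by omega : b ≤ max a lo)]
    simp
  | succ k ih =>
    intro a b hk ha
    by_cases hab : a < b
    · rw [PySem.List.pyRange_one_cons hab, List.filter_cons]
      have hiff : start ≤ a * a ↔ lo ≤ a := by
        have hm : (0:Int) ≤ max start 1 - 1 := by omega
        have hbr := sqrtInt_lt_iff (max start 1 - 1) a hm ha
        constructor
        · intro h
          have : max start 1 - 1 < a * a := by
            rcases le_or_gt start 1 with h1 | h1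
            · simp [max_eq_right h1]; nlinarith
            · rw [max_eq_left (by omega)]; omega
          omega
        · intro h
          have : max start 1 - 1 < a * a := by omega
          rcases le_or_gt start 1 with h1 | h1
          · nlinarith
          · rw [max_eq_left (by omega)] at this; omega
      rw [ih (a + 1) b (by omega) (by omega)]
      by_cases hla : lo ≤ a
      · rw [if_pos (by simpa using hiff.mpr hla)]
        have h1 : max a lo = a := by omega
        have h2 : max (a + 1) lo = a + 1 := by omega
        rw [h1, h2, PySem.List.pyRange_one_cons hab]
      · rw [not_le] at hla
        rw [if_neg (by simp [hiff]; omega)]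
        have h1 : max a lo = lo := by omega
        have h2 : max (a + 1) lo = lo := by omega
        rw [h1, h2]
    · rw [PySem.List.pyRange_one_eq_nil (by omega : b ≤ a),
          PySem.List.pyRange_one_eq_nil (by omega : b ≤ max a lo)]
      simp

-- ===== VERDICT (by name: the statement is the Claim_ definition above) =====
theorem square_gen_spec : Claim_equal_square_gen := by
  intro start stop _
  unfold Spec_square_gen
  by_cases hstop : 1 ≤ stop
  · -- main case
    have hhi1 : 1 ≤ (Nat.sqrt stop.toNat : Int) := by
      have : 0 < Nat.sqrt stop.toNat := Nat.sqrt_pos.mpr (by omega)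
      omega
    have hA : square_gen start stop = seg start (Nat.sqrt stop.toNat : Int) 1 := by
      rw [square_gen]
      have hle : (Nat.sqrt stop.toNat : Int) ≤ stop := by
        have := Nat.sqrt_le_self stop.toNat
        omega
      rw [squareGenLoop_eq start stop hstop (stop.toNat + 2) 1 0 []
            (by omega) (by omega) (by omega) (by omega)]
      simp
    have hB : square_gen_alt start stop
        = (PySem.List.pyRange ((Nat.sqrt (max start 1 - 1).toNat : Int) + 1)
            ((Nat.sqrt stop.toNat : Int) + 1) 1).map (fun n => n * n) := by
      rw [square_gen_alt, if_neg (by omega)]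
      rw [isqrt_eq stop (by omega), isqrt_eq (max start 1 - 1) (by omega)]
    rw [hA, hB, seg,
        filter_threshold start ((Nat.sqrt stop.toNat : Int)).toNat 1
          ((Nat.sqrt stop.toNat : Int) + 1) (by omega) (by omega)]
    have hmax : max 1 ((Nat.sqrt (max start 1 - 1).toNat : Int) + 1)
        = (Nat.sqrt (max start 1 - 1).toNat : Int) + 1 := by
      have : (0:Int) ≤ (Nat.sqrt (max start 1 - 1).toNat : Int) := by positivity
      omega
    rw [hmax]
  · -- stop ≤ 0 : both empty
    rw [not_le] at hstop
    have hB : square_gen_alt start stop = [] := by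
      rw [square_gen_alt, if_pos (by omega)]
    rw [hB, square_gen]
    by_cases h0 : stop = 0
    · subst h0
      norm_num [squareGenLoop]
    · have hneg : stop < 0 := by omega
      have ht : stop.toNat = 0 := by omega
      rw [ht]
      rw [squareGenLoop, if_neg (by omega)]
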